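-- pv_equiv track=rewrite | github.com/garden-kim-git/CodingTest | 프로그래머스/0/181880. 1로 만들기/1로 만들기.py | solution
-- ===== SOURCE A (Python) =====
-- def solution(num_list):
--     answer = 0
--     # 2, 4, 8, 16, 32... 2의 n승
--     for num in num_list :
--         if num == 1 : continue
--         elif num < 4 : answer += 1
--         elif num < 8 : answer += 2
--         elif num < 16 : answer += 3
--         else : answer += 4
--     return answer
-- ===== SOURCE B (Python) =====
-- def solution(num_list):
--     # Staged counting: total = (#elements != 1) + (#elements >= 4) + (#elements >= 8) + (#elements >= 16).
--     # Each element's bucket value 1..4 is exactly how many of these four predicates it satisfies.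
--     total = 0
--     for predicate in (lambda n: n != 1, lambda n: n >= 4, lambda n: n >= 8, lambda n: n >= 16):
--         total += sum(map(predicate, num_list))
--     return total
-- ===== Notes on version B (the rewrite author's own statement) =====
-- stated objective: alternative
-- what changed: Replaces A's single pass with a per-element branch ladder by four staged counting passes over the whole list, one per predicate (!=1, >=4, >=8, >=16), summing the counts instead of classifying each element.
import Mathlib
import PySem

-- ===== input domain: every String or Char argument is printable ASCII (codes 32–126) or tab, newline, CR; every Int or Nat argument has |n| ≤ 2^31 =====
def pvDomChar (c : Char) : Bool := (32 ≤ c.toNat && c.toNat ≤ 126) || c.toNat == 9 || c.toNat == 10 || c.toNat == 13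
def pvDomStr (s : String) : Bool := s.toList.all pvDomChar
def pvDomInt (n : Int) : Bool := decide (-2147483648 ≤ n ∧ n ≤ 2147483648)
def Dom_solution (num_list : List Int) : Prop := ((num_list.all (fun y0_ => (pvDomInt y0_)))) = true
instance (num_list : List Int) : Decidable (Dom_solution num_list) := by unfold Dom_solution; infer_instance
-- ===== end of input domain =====

-- B replaces A's one-pass branch ladder by four staged counting passes, one per predicate (objective: alternative).
-- ===== PORT A =====
def solution (num_list : List Int) : Int :=
  num_list.foldl (fun answer num =>
    if num == 1 then answer
    else if num < 4 then answer + 1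
    else if num < 8 then answer + 2
    else if num < 16 then answer + 3
    else answer + 4) 0

-- ===== PORT B =====
def solution_alt (num_list : List Int) : Int :=
  [(fun n : Int => n != 1), (fun n : Int => n ≥ 4), (fun n : Int => n ≥ 8), (fun n : Int => n ≥ 16)].foldl
    (fun total p => total + (num_list.countP p : Int)) 0

-- ===== PRECONDITION & SPEC =====
def Spec_solution (num_list : List Int) (out : Int) : Prop := out = solution_alt num_list
instance (num_list : List Int) (out : Int) : Decidable (Spec_solution num_list out) := by unfold Spec_solution; infer_instance

-- ===== CLAIM (what is proved, stated in full; the proofs are below) =====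
def Claim_equal_solution : Prop := ∀ (num_list : List Int), Dom_solution num_list → Spec_solution num_list (solution num_list)

-- ===== LEMMAS AND PROOFS =====
theorem solution_gen (num_list : List Int) (a : Int) :
    num_list.foldl (fun answer num =>
      if num == 1 then answer
      else if num < 4 then answer + 1
      else if num < 8 then answer + 2
      else if num < 16 then answer + 3
      else answer + 4) a =
    a + (num_list.countP (fun n => n != 1) : Int) + (num_list.countP (fun n => n ≥ 4) : Int)
      + (num_list.countP (fun n => n ≥ 8) : Int) + (num_list.countP (fun n => n ≥ 16) : Int) := by
  induction num_list generalizing a with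
  | nil => simp
  | cons x xs ih =>
    rw [List.foldl_cons, ih]
    simp only [List.countP_cons]
    split_ifs <;>
      simp only [decide_eq_true_eq, bne_iff_ne, beq_iff_eq, ne_eq, not_not, not_lt] at * <;>
      push_cast <;> omega

-- ===== VERDICT (by name: the statement is the Claim_ definition above) =====
theorem solution_spec : Claim_equal_solution := by
  intro l _
  unfold Spec_solution solution solution_alt
  simp only [List.foldl]
  have := solution_gen l 0
  omega
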